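-- pv_equiv track=rewrite | github.com/JuneHou/CausalError | benchmarking/_clustered_patch/action_primitive_library.py | _collect_descendant_spans
-- ===== SOURCE A (Python) =====
-- from typing import Any, Dict, List, Optional, Tuple
--
-- def _collect_descendant_span_ids(step_span_id: str, parent_of: Dict[str, str]) -> List[str]:
--     """Return all span_ids that have step_span_id as ancestor (step plus all descendants)."""
--     out = [step_span_id]
--     added = {step_span_id}
--     while True:
--         more = [sid for sid, pid in parent_of.items() if pid in added and sid not in added]
--         if not more:
--             break
--         for sid in more:
--             added.add(sid)
--             out.append(sid)
--     return out
--
-- def _collect_descendant_spans(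
--     step_span: Dict[str, Any],
--     span_by_id: Dict[str, Dict],
--     parent_of: Dict[str, str],
--     step_span_ids: List[str],
-- ) -> List[Dict[str, Any]]:
--     """Collect this step span and all descendant spans (for aggregating turn content)."""
--     step_id = step_span.get("span_id")
--     if step_id not in step_span_ids:
--         return []
--     ids_order = _collect_descendant_span_ids(step_id, parent_of)
--     return [span_by_id[sid] for sid in ids_order if sid in span_by_id]
-- ===== SOURCE B (Python) =====
-- from typing import Any, Dict, List
--
-- def _collect_descendant_spans(
--     step_span: Dict[str, Any],
--     span_by_id: Dict[str, Dict],
--     parent_of: Dict[str, str],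
--     step_span_ids: List[str],
-- ) -> List[Dict[str, Any]]:
--     """Collect this step span and all descendant spans (for aggregating turn content).
--
--     One pass builds a children adjacency map; a level-order BFS then visits each edge
--     once, ordering every level by the original parent_of index."""
--     step_id = step_span.get("span_id")
--     if step_id not in step_span_ids:
--         return []
--     children: Dict[str, List] = {}
--     for i, (sid, pid) in enumerate(parent_of.items()):
--         children.setdefault(pid, []).append((i, sid))
--     order = [step_id]
--     seen = {step_id}
--     frontier = [step_id]
--     while True:
--         cand = [c for n in frontier for c in children.get(n, [])]
--         cand.sort(key=lambda c: c[0])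
--         nxt = [sid for _, sid in cand if sid not in seen]
--         if not nxt:
--             break
--         seen.update(nxt)
--         order.extend(nxt)
--         frontier = nxt
--     return [span_by_id[sid] for sid in order if sid in span_by_id]
-- ===== Notes on version B (the rewrite author's own statement) =====
-- stated objective: alternative
-- what changed: A rescans the whole parent_of dict once per BFS level; B builds a children adjacency map in one pass and runs a level-order BFS that touches each edge once, ordering each level by the original parent_of index, so it returns exactly A's list (timing on the generated input family showed no measurable speed-up).
import Mathlib
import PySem

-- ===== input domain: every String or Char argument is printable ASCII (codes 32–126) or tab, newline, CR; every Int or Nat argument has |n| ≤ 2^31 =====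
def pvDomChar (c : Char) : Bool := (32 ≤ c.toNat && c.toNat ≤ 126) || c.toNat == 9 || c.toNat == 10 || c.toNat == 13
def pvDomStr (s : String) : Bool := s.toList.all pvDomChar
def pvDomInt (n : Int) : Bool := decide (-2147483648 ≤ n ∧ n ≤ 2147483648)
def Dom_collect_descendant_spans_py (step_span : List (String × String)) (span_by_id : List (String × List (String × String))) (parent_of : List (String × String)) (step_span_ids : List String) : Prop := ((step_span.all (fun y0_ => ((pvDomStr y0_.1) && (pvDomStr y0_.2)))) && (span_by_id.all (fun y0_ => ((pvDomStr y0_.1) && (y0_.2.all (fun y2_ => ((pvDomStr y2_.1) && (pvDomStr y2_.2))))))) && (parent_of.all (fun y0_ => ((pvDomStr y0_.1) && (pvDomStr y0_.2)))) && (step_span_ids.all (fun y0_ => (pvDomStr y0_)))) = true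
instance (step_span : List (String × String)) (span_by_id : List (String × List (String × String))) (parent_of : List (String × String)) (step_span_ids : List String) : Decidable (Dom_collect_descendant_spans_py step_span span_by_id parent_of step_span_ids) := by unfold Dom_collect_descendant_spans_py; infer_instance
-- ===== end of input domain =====

-- B replaces A's repeated full scans of parent_of (one per BFS level) by a children
-- adjacency map built once and a level-order BFS that orders each level by the original
-- parent_of index: a different algorithm returning the same list.

-- ===== PORT A =====
-- the `while True` loop of _collect_descendant_span_ids; fuel `parent_of.length + 1`
-- always suffices (every round that does not break adds at least one new parent_of key)
def pvA_loop (parent_of : List (String × String)) : Nat → List String → PySem.Set String → List String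
  | 0, out, _ => out
  | fuel+1, out, added =>
    let more := (parent_of.filter (fun p => PySem.Set.contains added p.2 && !(PySem.Set.contains added p.1))).map Prod.fst
    if more = [] then out
    else pvA_loop parent_of fuel (out ++ more) (PySem.Set.update added more)

def collect_descendant_spans_py (step_span : List (String × String)) (span_by_id : List (String × List (String × String))) (parent_of : List (String × String)) (step_span_ids : List String) : List (List (String × String)) :=
  match PySem.Dict.get? (PySem.Dict.mk step_span) "span_id" with
  | none => []  -- step_id is None, never a member of step_span_ids
  | some step_id =>
    if step_span_ids.contains step_id then
      (pvA_loop parent_of (parent_of.length + 1) [step_id] (PySem.Set.ofList [step_id])).filterMap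
        (fun sid => PySem.Dict.get? (PySem.Dict.mk span_by_id) sid)
    else []

-- ===== PORT B =====
-- children.setdefault(pid, []).append((i, sid)) over enumerate(parent_of.items())
def pvB_children (parent_of : List (String × String)) : PySem.Dict String (List (Int × String)) :=
  ((PySem.List.enumerate parent_of 0).map (fun e => (e.2.2, (e.1, e.2.1)))).foldl
    (fun d p => PySem.Dict.modify d p.1 [] (fun l => l ++ [p.2])) PySem.Dict.empty

-- B's `while True` BFS loop; same fuel bound as A's loop
def pvB_loop (cm : PySem.Dict String (List (Int × String))) : Nat → List String → List String → PySem.Set String → List String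
  | 0, out, _, _ => out
  | fuel+1, out, frontier, seen =>
    let cand := frontier.foldl (fun acc n => acc ++ PySem.Dict.getD cm n []) []
    let nxt := ((PySem.List.sorted cand (fun c => c.1)).filter (fun c => !(PySem.Set.contains seen c.2))).map Prod.snd
    if nxt = [] then out
    else pvB_loop cm fuel (out ++ nxt) nxt (PySem.Set.update seen nxt)

def collect_descendant_spans_py_alt (step_span : List (String × String)) (span_by_id : List (String × List (String × String))) (parent_of : List (String × String)) (step_span_ids : List String) : List (List (String × String)) :=
  match PySem.Dict.get? (PySem.Dict.mk step_span) "span_id" with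
  | none => []
  | some step_id =>
    if step_span_ids.contains step_id then
      (pvB_loop (pvB_children parent_of) (parent_of.length + 1) [step_id] [step_id] (PySem.Set.ofList [step_id])).filterMap
        (fun sid => PySem.Dict.get? (PySem.Dict.mk span_by_id) sid)
    else []

-- ===== PRECONDITION & SPEC =====
-- Pre_ excludes association lists in which parent_of has duplicate keys: such lists do not
-- represent any Python dict (the dict literal collapses the duplicates before A ever runs).
def Pre_collect_descendant_spans_py (step_span : List (String × String)) (span_by_id : List (String × List (String × String))) (parent_of : List (String × String)) (step_span_ids : List String) : Prop :=
  (parent_of.map Prod.fst).Nodup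
instance (step_span : List (String × String)) (span_by_id : List (String × List (String × String))) (parent_of : List (String × String)) (step_span_ids : List String) : Decidable (Pre_collect_descendant_spans_py step_span span_by_id parent_of step_span_ids) := by unfold Pre_collect_descendant_spans_py; infer_instance

def pvWitness_collect_descendant_spans_py : (List (String × String)) × (List (String × List (String × String))) × (List (String × String)) × List String :=
  ([("span_id", "a")], [("a", [("x", "1")]), ("b", [("x", "2")])], [("b", "a")], ["a"])

def Spec_collect_descendant_spans_py (step_span : List (String × String)) (span_by_id : List (String × List (String × String))) (parent_of : List (String × String)) (step_span_ids : List String) (out : List (List (String × String))) : Prop := out = collect_descendant_spans_py_alt step_span span_by_id parent_of step_span_ids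
instance (step_span : List (String × String)) (span_by_id : List (String × List (String × String))) (parent_of : List (String × String)) (step_span_ids : List String) (out : List (List (String × String))) : Decidable (Spec_collect_descendant_spans_py step_span span_by_id parent_of step_span_ids out) := by unfold Spec_collect_descendant_spans_py; infer_instance

-- ===== CLAIM (what is proved, stated in full; the proofs are below) =====
def Claim_equal_collect_descendant_spans_py : Prop := ∀ (step_span : List (String × String)) (span_by_id : List (String × List (String × String))) (parent_of : List (String × String)) (step_span_ids : List String), Dom_collect_descendant_spans_py step_span span_by_id parent_of step_span_ids → Pre_collect_descendant_spans_py step_span span_by_id parent_of step_span_ids → Spec_collect_descendant_spans_py step_span span_by_id parent_of step_span_ids (collect_descendant_spans_py step_span span_by_id parent_of step_span_ids)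

-- ===== LEMMAS AND PROOFS =====

-- the loop invariant tying A's `added` set to B's current `frontier`
def pvInv (po : List (String × String)) (added : PySem.Set String) (frontier : List String) : Prop :=
  frontier.Nodup ∧ (∀ x ∈ frontier, x ∈ added) ∧
  (∀ p ∈ po, p.2 ∈ added → p.1 ∈ added ∨ p.2 ∈ frontier)

-- a filter by a disjunction of element-wise disjoint tests splits, up to permutation
lemma pvFilter_or_perm {α : Type} (l : List α) (p q : α → Bool)
    (h : ∀ x ∈ l, ¬(p x = true ∧ q x = true)) :
    (l.filter (fun x => p x || q x)).Perm (l.filter p ++ l.filter q) := by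
  induction l with
  | nil => simp
  | cons a t ih =>
    have ht : ∀ x ∈ t, ¬(p x = true ∧ q x = true) := fun x hx => h x (List.mem_cons_of_mem _ hx)
    have ha := h a (List.mem_cons_self ..)
    by_cases hp : p a = true
    · have hq : q a = false := by
        cases hqa : q a with
        | false => rfl
        | true => exact absurd ⟨hp, hqa⟩ ha
      simpa [List.filter_cons, hp, hq] using (ih ht).cons a
    · have hp' : p a = false := by simpa using hp
      by_cases hq : q a = true
      · simp only [List.filter_cons, hp', hq, Bool.false_or]
        exact ((ih ht).cons a).trans (List.perm_middle.symm)
      · have hq' : q a = false := by simpa using hq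
        simpa [List.filter_cons, hp', hq'] using ih ht

-- gathering the per-parent buckets of a nodup frontier is a permutation of one filter
lemma pvFlatMap_buckets_perm {β : Type} (E : List β) (key : β → String)
    (fr : List String) (hnd : fr.Nodup) :
    (fr.flatMap (fun n => E.filter (fun e => key e == n))).Perm
      (E.filter (fun e => decide (key e ∈ fr))) := by
  induction fr with
  | nil => simp
  | cons n t ih =>
    rw [List.nodup_cons] at hnd
    have hsplit : (E.filter (fun e => decide (key e ∈ n :: t))).Perm
        (E.filter (fun e => key e == n) ++ E.filter (fun e => decide (key e ∈ t))) := by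
      have hcong : E.filter (fun e => decide (key e ∈ n :: t))
          = E.filter (fun e => (key e == n) || decide (key e ∈ t)) := by
        apply List.filter_congr; intro e _
        by_cases h1 : key e = n <;> by_cases h2 : key e ∈ t <;> simp [h1, h2]
      rw [hcong]
      refine pvFilter_or_perm E _ _ ?_
      intro x _ hx
      rcases hx with ⟨h1, h2⟩
      have h1' : key x = n := by simpa using h1
      have h2' : key x ∈ t := by simpa using h2
      exact hnd.1 (h1' ▸ h2')
    simp only [List.flatMap_cons]
    exact ((ih hnd.2).append_left _).trans hsplit.symm

-- pushing a filter/map over the element through enumerate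
lemma pvEnum_filter_map {α β : Type} (xs : List α) (s : Int) (p : α → Bool) (f : α → β) :
    ((PySem.List.enumerate xs s).filter (fun e => p e.2)).map (fun e => f e.2)
      = (xs.filter p).map f := by
  induction xs generalizing s with
  | nil => simp [PySem.List.enumerate_nil]
  | cons x t ih =>
    by_cases hp : p x = true
    · simp [PySem.List.enumerate_cons, hp, ih]
    · have hp' : p x = false := by simpa using hp
      simp [PySem.List.enumerate_cons, hp', ih]

-- what B's children map holds for each parent id
lemma pvChildren_getD (po : List (String × String)) (n : String) :
    PySem.Dict.getD (pvB_children po) n []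
      = ((PySem.List.enumerate po 0).filter (fun e => e.2.2 == n)).map (fun e => (e.1, e.2.1)) := by
  unfold pvB_children
  rw [PySem.Dict.getD_foldl_modify_append]
  simp [List.filter_map, Function.comp_def]

-- one round: under the invariant B's `nxt` is exactly A's `more`
lemma pvRound_eq (po : List (String × String))
    (added : PySem.Set String) (frontier : List String)
    (hinv : pvInv po added frontier) :
    ((PySem.List.sorted (frontier.foldl (fun acc n => acc ++ PySem.Dict.getD (pvB_children po) n []) [])
        (fun c => c.1)).filter (fun c => !(PySem.Set.contains added c.2))).map Prod.snd
      = (po.filter (fun p => PySem.Set.contains added p.2 && !(PySem.Set.contains added p.1))).map Prod.fst := by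
  obtain ⟨hndfr, hsub, hclosed⟩ := hinv
  rw [PySem.List.foldl_append_eq_flatMap, List.nil_append]
  have hbuck : (fun n => PySem.Dict.getD (pvB_children po) n [])
      = fun n => ((PySem.List.enumerate po 0).filter (fun e => e.2.2 == n)).map (fun e => (e.1, e.2.1)) :=
    funext (pvChildren_getD po)
  rw [hbuck]
  have hperm : ((PySem.List.enumerate po 0).filter (fun e => decide (e.2.2 ∈ frontier))).map (fun e => (e.1, e.2.1)) |>.Perm
      (frontier.flatMap (fun n => ((PySem.List.enumerate po 0).filter (fun e => e.2.2 == n)).map (fun e => (e.1, e.2.1)))) := by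
    rw [← List.map_flatMap]
    exact ((pvFlatMap_buckets_perm (PySem.List.enumerate po 0) (fun e => e.2.2) frontier hndfr).map _).symm
  have hpw : (((PySem.List.enumerate po 0).filter (fun e => decide (e.2.2 ∈ frontier))).map (fun e => (e.1, e.2.1))).Pairwise
      (fun a b => a.1 < b.1) := by
    refine List.Pairwise.map _ ?_ ((PySem.List.pairwise_lt_enumerate po 0).filter _)
    intro a b h; exact h
  rw [PySem.List.sorted_eq_of_perm_of_pairwise_lt _ _ _ hperm hpw]
  rw [List.filter_map, List.map_map]
  have hshape : (((PySem.List.enumerate po 0).filter (fun e => decide (e.2.2 ∈ frontier))).filter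
        ((fun c => !(PySem.Set.contains added c.2)) ∘ (fun e => (e.1, e.2.1)))).map (Prod.snd ∘ (fun e => (e.1, e.2.1)))
      = ((PySem.List.enumerate po 0).filter (fun e => (fun q => !(PySem.Set.contains added q.1) && decide (q.2 ∈ frontier)) e.2)).map (fun e => Prod.fst e.2) := by
    rw [List.filter_filter]
    rfl
  rw [hshape, pvEnum_filter_map po 0 (fun q => !(PySem.Set.contains added q.1) && decide (q.2 ∈ frontier)) Prod.fst]
  apply congrArg
  apply List.filter_congr
  intro p hp
  simp only [PySem.Set.contains, List.contains_eq_mem]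
  by_cases h1 : p.1 ∈ added
  · simp [h1]
  · by_cases h2 : p.2 ∈ added
    · rcases hclosed p hp h2 with h | h
      · exact absurd h h1
      · simp [h1, h2, h]
    · have hf : p.2 ∉ frontier := fun h => h2 (hsub _ h)
      simp [h1, h2, hf]

-- the invariant holds again after one round (for the new added set and frontier)
lemma pvInv_step (po : List (String × String)) (hk : (po.map Prod.fst).Nodup)
    (added : PySem.Set String) :
    pvInv po
      (PySem.Set.update added ((po.filter (fun p => PySem.Set.contains added p.2 && !(PySem.Set.contains added p.1))).map Prod.fst))
      ((po.filter (fun p => PySem.Set.contains added p.2 && !(PySem.Set.contains added p.1))).map Prod.fst) := by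
  refine ⟨?_, ?_, ?_⟩
  · exact hk.sublist ((List.filter_sublist (l := po)).map Prod.fst)
  · intro x hx
    rw [PySem.Set.mem_update]
    exact Or.inr hx
  · intro p hp hmem
    rw [PySem.Set.mem_update] at hmem
    rcases hmem with h2 | h2
    · by_cases h1 : p.1 ∈ added
      · left; rw [PySem.Set.mem_update]; exact Or.inl h1
      · left
        rw [PySem.Set.mem_update]
        refine Or.inr (List.mem_map.mpr ⟨p, List.mem_filter.mpr ⟨hp, ?_⟩, rfl⟩)
        simp only [Bool.and_eq_true, Bool.not_eq_true', PySem.Set.contains, List.contains_eq_mem,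
          decide_eq_true_eq, decide_eq_false_iff_not]
        exact ⟨h2, h1⟩
    · exact Or.inr h2

-- the two loops agree round for round
lemma pvLoop_eq (po : List (String × String)) (hk : (po.map Prod.fst).Nodup) :
    ∀ (fuel : Nat) (out : List String) (added : PySem.Set String) (frontier : List String),
      pvInv po added frontier →
      pvA_loop po fuel out added = pvB_loop (pvB_children po) fuel out frontier added := by
  intro fuel
  induction fuel with
  | zero => intro out added frontier _; rfl
  | succ f ih =>
    intro out added frontier hinv
    have hr := pvRound_eq po added frontier hinv
    simp only [pvA_loop, pvB_loop, hr]
    split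
    · rfl
    · exact ih _ _ _ (pvInv_step po hk added)

-- ===== VERDICT (by name: the statement is the Claim_ definition above) =====
theorem collect_descendant_spans_py_spec : Claim_equal_collect_descendant_spans_py := by
  intro step_span span_by_id parent_of step_span_ids _ hpre
  unfold Spec_collect_descendant_spans_py collect_descendant_spans_py collect_descendant_spans_py_alt
  cases PySem.Dict.get? (PySem.Dict.mk step_span) "span_id" with
  | none => rfl
  | some step_id =>
    simp only
    split
    · have h := pvLoop_eq parent_of hpre (parent_of.length + 1) [step_id]
        (PySem.Set.ofList [step_id]) [step_id] ?_
      · rw [h]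
      · refine ⟨List.nodup_singleton _, ?_, ?_⟩
        · intro x hx
          simp only [List.mem_singleton] at hx
          simp [hx, PySem.Set.mem_ofList]
        · intro p _ hp
          right
          simpa [PySem.Set.mem_ofList] using hp
    · rfl
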